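-- pv_equiv track=rewrite | github.com/MrBrantCode/unitest_baseline | mut_generate/mist_train_cf/cf_96982/solution.py | is_substring_present
-- ===== SOURCE A (Python) =====
-- def is_substring_present(strings, substring):
--     """
--     Checks if the substring is present in any string in the set of strings.
--     The substring is a palindrome and has a length of 5 or more.
--
--     Args:
--         strings (list): A list of strings to search in.
--         substring (str): The substring to search for.
--
--     Returns:
--         bool: True if the substring is found, False otherwise.
--     """
--     def is_palindrome(string):
--         return string == string[::-1]
--
--     for string in strings:
--         for i in range(len(string)-4):  # minimum length of substring should be 5
--             sub = string[i:i+5]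
--             if is_palindrome(sub) and substring in sub:
--                 return True
--     return False
-- ===== SOURCE B (Python) =====
-- def is_substring_present(strings, substring):
--     """Occurrence-driven search: scan for occurrences of substring, then test
--     only the length-5 windows that can contain each occurrence for palindromicity
--     (checked by two index comparisons instead of slicing and reversing)."""
--     L = len(substring)
--     if L > 5:
--         return False
--     for s in strings:
--         n = len(s)
--         for p in range(n - L + 1):
--             if s[p:p+L] != substring:
--                 continue
--             lo = max(0, p + L - 5)
--             hi = min(p, n - 5)
--             for j in range(lo, hi + 1):
--                 if s[j] == s[j+4] and s[j+1] == s[j+3]: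
--                     return True
--     return False
-- ===== Notes on version B (the rewrite author's own statement) =====
-- stated objective: faster
-- what changed: Instead of slicing every length-5 window, reversing it and testing substring membership, B scans for occurrences of the substring and palindrome-tests only the windows that can contain each occurrence, using two index comparisons (s[j]==s[j+4] and s[j+1]==s[j+3]) instead of slice+reverse; substrings longer than 5 are rejected up front.
import Mathlib
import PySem

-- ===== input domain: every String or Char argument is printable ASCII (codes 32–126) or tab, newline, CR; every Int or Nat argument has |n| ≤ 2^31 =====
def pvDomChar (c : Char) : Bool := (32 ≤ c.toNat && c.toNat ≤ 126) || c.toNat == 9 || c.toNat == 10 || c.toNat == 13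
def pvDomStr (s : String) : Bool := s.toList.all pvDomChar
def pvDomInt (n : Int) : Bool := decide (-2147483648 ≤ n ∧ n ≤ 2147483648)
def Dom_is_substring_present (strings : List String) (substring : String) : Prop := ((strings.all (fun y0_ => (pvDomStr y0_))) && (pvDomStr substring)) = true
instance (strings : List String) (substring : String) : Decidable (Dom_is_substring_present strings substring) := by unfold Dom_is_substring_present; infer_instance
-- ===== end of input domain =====

-- ===== PORT A =====
-- Header: B finds occurrences of `substring` and palindrome-tests only the windows
-- around them by index comparisons, instead of A's palindrome-test of every window.
-- is_palindrome(string): string == string[::-1]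
def pvIsPalindromeA (s : String) : Bool := some s == PySem.Str.slice? s none none (-1)

def is_substring_present (strings : List String) (substring : String) : Bool :=
  strings.any (fun s =>
    (PySem.List.pyRange 0 (PySem.Str.len s - 4) 1).any (fun i =>
      let sub := PySem.Str.slice s (some i) (some (i + 5))
      pvIsPalindromeA sub && PySem.Str.isIn substring sub))

-- ===== PORT B =====
def is_substring_present_alt (strings : List String) (substring : String) : Bool :=
  let L := PySem.Str.len substring
  if L > 5 then false
  else
    strings.any (fun s =>
      let n := PySem.Str.len s
      (PySem.List.pyRange 0 (n - L + 1) 1).any (fun p =>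
        if PySem.Str.slice s (some p) (some (p + L)) != substring then false
        else
          (PySem.List.pyRange (max 0 (p + L - 5)) (min p (n - 5) + 1) 1).any (fun j =>
            PySem.Str.pyGet? s j == PySem.Str.pyGet? s (j + 4) &&
              PySem.Str.pyGet? s (j + 1) == PySem.Str.pyGet? s (j + 3))))

-- ===== PRECONDITION & SPEC =====
def Spec_is_substring_present (strings : List String) (substring : String) (out : Bool) : Prop := out = is_substring_present_alt strings substring
instance (strings : List String) (substring : String) (out : Bool) : Decidable (Spec_is_substring_present strings substring out) := by unfold Spec_is_substring_present; infer_instance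

-- ===== CLAIM (what is proved, stated in full; the proofs are below) =====
def Claim_equal_is_substring_present : Prop := ∀ (strings : List String) (substring : String), Dom_is_substring_present strings substring → Spec_is_substring_present strings substring (is_substring_present strings substring)

-- ===== LEMMAS AND PROOFS =====

-- A-side inner condition, list level
def pvPA (cs sub : List Char) : Prop :=
  ∃ k : Nat, k + 5 ≤ cs.length ∧
    (cs.drop k).take 5 = ((cs.drop k).take 5).reverse ∧ sub <:+: (cs.drop k).take 5

-- B-side inner condition, list level
def pvPB (cs sub : List Char) : Prop :=
  ∃ p : Nat, p + sub.length ≤ cs.length ∧ (cs.drop p).take sub.length = sub ∧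
    ∃ j : Nat, j ≤ p ∧ p + sub.length ≤ j + 5 ∧ j + 5 ≤ cs.length ∧
      cs[j]? = cs[j + 4]? ∧ cs[j + 1]? = cs[j + 3]?

lemma pv_pal_iff (w : String) : pvIsPalindromeA w = true ↔ w.toList = w.toList.reverse := by
  unfold pvIsPalindromeA
  rw [PySem.Str.slice?_none_none_neg_one]
  simp only [Option.some_beq_some, beq_iff_eq]
  rw [← String.toList_inj, String.toList_ofList]

lemma pv_ex5 (l : List Char) (h : 5 ≤ l.length) :
    ∃ a b c d e t, l = a :: b :: c :: d :: e :: t := by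
  rcases l with _ | ⟨a, _ | ⟨b, _ | ⟨c, _ | ⟨d, _ | ⟨e, t⟩⟩⟩⟩⟩ <;> simp at h
  exact ⟨a, b, c, d, e, t, rfl⟩

lemma pv_pal5 (cs : List Char) (k : Nat) (h : k + 5 ≤ cs.length) :
    ((cs.drop k).take 5 = ((cs.drop k).take 5).reverse) ↔
      (cs[k]? = cs[k + 4]? ∧ cs[k + 1]? = cs[k + 3]?) := by
  obtain ⟨a, b, c, d, e, t, hd⟩ := pv_ex5 (cs.drop k) (by simp; omega)
  have h0 : cs[k]? = some a := by rw [show k = k + 0 by omega, ← List.getElem?_drop, hd]; rfl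
  have h1 : cs[k + 1]? = some b := by rw [← List.getElem?_drop, hd]; rfl
  have h3 : cs[k + 3]? = some d := by rw [← List.getElem?_drop, hd]; rfl
  have h4 : cs[k + 4]? = some e := by rw [← List.getElem?_drop, hd]; rfl
  rw [hd, h0, h1, h3, h4]
  simp only [List.take_succ_cons, List.take_zero, List.reverse_cons, List.reverse_nil,
    List.nil_append, List.cons_append, List.cons.injEq, and_true, Option.some.injEq]
  constructor
  · rintro ⟨rfl, rfl, -⟩; exact ⟨rfl, rfl⟩
  · rintro ⟨rfl, rfl⟩; tauto

lemma pv_core (cs sub : List Char) (hL : sub.length ≤ 5) : pvPA cs sub ↔ pvPB cs sub := by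
  constructor
  · rintro ⟨k, hk, hpal, hinf⟩
    rw [List.infix_iff_prefix_suffix] at hinf
    obtain ⟨t, hpre, hsuf⟩ := hinf
    obtain ⟨u, hu⟩ := hsuf
    have hwlen : ((cs.drop k).take 5).length = 5 := by simp; omega
    have hulen : u.length + t.length = 5 := by
      have := congrArg List.length hu; simpa using this.trans hwlen
    have hsubt : sub.length ≤ t.length := hpre.length_le
    have ht : t = ((cs.drop k).take 5).drop u.length := by
      rw [← hu, List.drop_left]
    have hocc : (cs.drop (k + u.length)).take sub.length = sub := by
      rw [List.prefix_iff_eq_take] at hpre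
      rw [ht, List.drop_take, List.drop_drop, List.take_take,
        show min sub.length (5 - u.length) = sub.length by omega] at hpre
      exact hpre.symm
    refine ⟨k + u.length, by omega, hocc, k, by omega, by omega, hk, ?_, ?_⟩
    · exact ((pv_pal5 cs k hk).mp hpal).1
    · exact ((pv_pal5 cs k hk).mp hpal).2
  · rintro ⟨p, hp, hocc, j, hjp, hpj, hjn, hi1, hi2⟩
    refine ⟨j, hjn, (pv_pal5 cs j hjn).mpr ⟨hi1, hi2⟩, ?_⟩
    rw [List.infix_iff_prefix_suffix]
    refine ⟨((cs.drop j).take 5).drop (p - j), ?_, List.drop_suffix _ _⟩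
    rw [List.prefix_iff_eq_take]
    rw [List.drop_take, List.drop_drop, show j + (p - j) = p by omega, List.take_take,
      show min sub.length (5 - (p - j)) = sub.length by omega, hocc]

lemma pv_window_toList (s : String) (i : Int) (h0 : 0 ≤ i) :
    (PySem.Str.slice s (some i) (some (i + 5))).toList =
      (s.toList.drop i.toNat).take 5 := by
  rw [PySem.Str.toList_slice, PySem.Chars.slice_eq_listSlice,
    PySem.List.slice_toNat _ h0 (by omega),
    show (i + 5).toNat - i.toNat = 5 by omega]

lemma pv_bridgeA (s substring : String) :
    ((PySem.List.pyRange 0 (PySem.Str.len s - 4) 1).any (fun i =>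
        let sub := PySem.Str.slice s (some i) (some (i + 5))
        pvIsPalindromeA sub && PySem.Str.isIn substring sub)) = true ↔
      pvPA s.toList substring.toList := by
  have hlen : PySem.Str.len s = (s.toList.length : Int) := by simp
  rw [List.any_eq_true]
  constructor
  · rintro ⟨i, hmem, hcond⟩
    rw [PySem.List.mem_pyRange_one, hlen] at hmem
    obtain ⟨h0, hi⟩ := hmem
    simp only [Bool.and_eq_true] at hcond
    obtain ⟨hpal, hin⟩ := hcond
    rw [pv_pal_iff, pv_window_toList s i h0] at hpal
    rw [PySem.Str.isIn_eq, PySem.Chars.isIn_iff_infix, pv_window_toList s i h0] at hin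
    exact ⟨i.toNat, by omega, hpal, hin⟩
  · rintro ⟨k, hk, hpal, hin⟩
    refine ⟨(k : Int), ?_, ?_⟩
    · rw [PySem.List.mem_pyRange_one, hlen]; omega
    · simp only [Bool.and_eq_true]
      constructor
      · rw [pv_pal_iff, pv_window_toList s k (by omega)]
        simpa using hpal
      · rw [PySem.Str.isIn_eq, PySem.Chars.isIn_iff_infix, pv_window_toList s k (by omega)]
        simpa using hin

lemma pv_occ_toList (s substring : String) (p : Int) (h0 : 0 ≤ p) :
    (PySem.Str.slice s (some p) (some (p + PySem.Str.len substring))).toList =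
      (s.toList.drop p.toNat).take substring.toList.length := by
  rw [PySem.Str.toList_slice, PySem.Chars.slice_eq_listSlice, PySem.Str.len_eq,
    PySem.List.slice_toNat _ h0 (by omega),
    show (p + (substring.toList.length : Int)).toNat - p.toNat = substring.toList.length by omega]

lemma pv_bridgeB (s substring : String) :
    ((PySem.List.pyRange 0 (PySem.Str.len s - PySem.Str.len substring + 1) 1).any (fun p =>
        if PySem.Str.slice s (some p) (some (p + PySem.Str.len substring)) != substring then false
        else
          (PySem.List.pyRange (max 0 (p + PySem.Str.len substring - 5))
              (min p (PySem.Str.len s - 5) + 1) 1).any (fun j =>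
            PySem.Str.pyGet? s j == PySem.Str.pyGet? s (j + 4) &&
              PySem.Str.pyGet? s (j + 1) == PySem.Str.pyGet? s (j + 3)))) = true ↔
      pvPB s.toList substring.toList := by
  have hlen : PySem.Str.len s = (s.toList.length : Int) := by simp
  have hlsub : PySem.Str.len substring = (substring.toList.length : Int) := by simp
  rw [List.any_eq_true]
  constructor
  · rintro ⟨p, hmem, hcond⟩
    rw [PySem.List.mem_pyRange_one, hlen, hlsub] at hmem
    obtain ⟨hp0, hpn⟩ := hmem
    by_cases heq : PySem.Str.slice s (some p) (some (p + PySem.Str.len substring)) = substring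
    · simp only [heq, bne_self_eq_false, Bool.false_eq_true, if_false] at hcond
      rw [List.any_eq_true] at hcond
      obtain ⟨j, hjmem, hj⟩ := hcond
      rw [PySem.List.mem_pyRange_one, hlen, hlsub] at hjmem
      have hj0 : 0 ≤ j := le_trans (le_max_left 0 _) hjmem.1
      simp only [PySem.Str.pyGet?_eq, PySem.Chars.pyGet?_eq_listPyGet?,
        PySem.List.pyGet?_of_nonneg _ hj0, PySem.List.pyGet?_of_nonneg _ (by omega : (0:Int) ≤ j + 4),
        PySem.List.pyGet?_of_nonneg _ (by omega : (0:Int) ≤ j + 1),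
        PySem.List.pyGet?_of_nonneg _ (by omega : (0:Int) ≤ j + 3),
        Bool.and_eq_true, beq_iff_eq] at hj
      have hocc : (s.toList.drop p.toNat).take substring.toList.length = substring.toList := by
        rw [← pv_occ_toList s substring p hp0, heq]
      refine ⟨p.toNat, by omega, hocc, j.toNat, by omega, by omega, by omega, ?_, ?_⟩
      · rw [show j.toNat + 4 = (j+4).toNat by omega]; exact hj.1
      · rw [show j.toNat + 1 = (j + 1).toNat by omega,
            show j.toNat + 3 = (j + 3).toNat by omega]
        exact hj.2
    · rw [if_pos (show (PySem.Str.slice s (some p) (some (p + PySem.Str.len substring)) != substring) = true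
        from bne_iff_ne.mpr heq)] at hcond
      exact absurd hcond Bool.false_ne_true
  · rintro ⟨p, hp, hocc, j, hjp, hpj, hjn, hi1, hi2⟩
    refine ⟨(p : Int), ?_, ?_⟩
    · rw [PySem.List.mem_pyRange_one, hlen, hlsub]
      constructor <;> omega
    · have heq : PySem.Str.slice s (some (p:Int)) (some ((p:Int) + PySem.Str.len substring)) = substring := by
        apply String.toList_inj.mp
        rw [pv_occ_toList s substring _ (by omega)]
        simpa using hocc
      simp only [heq, bne_self_eq_false, Bool.false_eq_true, if_false]
      rw [List.any_eq_true]
      refine ⟨(j : Int), ?_, ?_⟩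
      · rw [PySem.List.mem_pyRange_one, hlen, hlsub]
        constructor
        · apply max_le <;> omega
        · have : (j:Int) ≤ min (p:Int) ((s.toList.length : Int) - 5) := le_min (by omega) (by omega)
          omega
      · simp only [PySem.Str.pyGet?_eq, PySem.Chars.pyGet?_eq_listPyGet?,
          PySem.List.pyGet?_of_nonneg _ (by omega : (0:Int) ≤ (j:Int)),
          PySem.List.pyGet?_of_nonneg _ (by omega : (0:Int) ≤ (j:Int) + 4),
          PySem.List.pyGet?_of_nonneg _ (by omega : (0:Int) ≤ (j:Int) + 1),
          PySem.List.pyGet?_of_nonneg _ (by omega : (0:Int) ≤ (j:Int) + 3),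
          Bool.and_eq_true, beq_iff_eq]
        constructor
        · rw [show ((j:Int)).toNat = j by omega, show ((j:Int)+4).toNat = j + 4 by omega]; exact hi1
        · rw [show ((j:Int)+1).toNat = j + 1 by omega, show ((j:Int)+3).toNat = j + 3 by omega]; exact hi2

lemma pv_take5_len (cs : List Char) (k : Nat) : ((cs.drop k).take 5).length ≤ 5 := by
  simp


theorem pv_main (strings : List String) (substring : String) :
    is_substring_present strings substring = is_substring_present_alt strings substring := by
  have hlsub : PySem.Str.len substring = (substring.toList.length : Int) := by simp
  simp only [is_substring_present, is_substring_present_alt]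
  by_cases hL : PySem.Str.len substring > 5
  · rw [if_pos hL]
    rw [← Bool.not_eq_true, List.any_eq_true]
    rintro ⟨s, hs, hinner⟩
    obtain ⟨k, -, -, hinf⟩ := (pv_bridgeA s substring).mp hinner
    have h1 := hinf.length_le
    have h2 := pv_take5_len s.toList k
    omega
  · rw [if_neg hL]
    have hsub : substring.toList.length ≤ 5 := by omega
    apply Bool.eq_iff_iff.mpr
    rw [List.any_eq_true, List.any_eq_true]
    constructor
    · rintro ⟨s, hs, h⟩
      exact ⟨s, hs, (pv_bridgeB s substring).mpr ((pv_core _ _ hsub).mp ((pv_bridgeA s substring).mp h))⟩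
    · rintro ⟨s, hs, h⟩
      exact ⟨s, hs, (pv_bridgeA s substring).mpr ((pv_core _ _ hsub).mpr ((pv_bridgeB s substring).mp h))⟩

-- ===== VERDICT =====
theorem is_substring_present_spec : Claim_equal_is_substring_present := by
  intro strings substring _
  unfold Spec_is_substring_present
  exact pv_main strings substring
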